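-- pv_equiv track=rewrite | github.com/Nemesis-dev18/Cup_P | # ejercicios de def.py | tempeuratura
-- ===== SOURCE A (Python) =====
-- def tempeuratura(lista):
--         for i in lista:
--             if i<0 :
--                 return "HELADO"
--             if i>=0 and i<10:
--                 return "FRIO"
--             if i>=10 and i<20:
--                 return "CALIDO"
--             if i>=20 and i<30:
--                 return "SOFOCANTE"
--             if i>=30:
--                 return "ABRASIVO"
-- ===== SOURCE B (Python) =====
-- def tempeuratura(lista):
--     boundaries = (0, 10, 20, 30)
--     labels = ("HELADO", "FRIO", "CALIDO", "SOFOCANTE", "ABRASIVO")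
--     for i in lista:
--         return labels[sum(b <= i for b in boundaries)]
-- ===== Notes on version B (the rewrite author's own statement) =====
-- stated objective: idiomatic
-- what changed: replaces the five-way if/elif chain with a sorted boundary table and a parallel label tuple, classifying the first element by counting the boundaries it meets
-- outside the precondition, e.g. on tempeuratura([]): A returns None, B returns None
import Mathlib
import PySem

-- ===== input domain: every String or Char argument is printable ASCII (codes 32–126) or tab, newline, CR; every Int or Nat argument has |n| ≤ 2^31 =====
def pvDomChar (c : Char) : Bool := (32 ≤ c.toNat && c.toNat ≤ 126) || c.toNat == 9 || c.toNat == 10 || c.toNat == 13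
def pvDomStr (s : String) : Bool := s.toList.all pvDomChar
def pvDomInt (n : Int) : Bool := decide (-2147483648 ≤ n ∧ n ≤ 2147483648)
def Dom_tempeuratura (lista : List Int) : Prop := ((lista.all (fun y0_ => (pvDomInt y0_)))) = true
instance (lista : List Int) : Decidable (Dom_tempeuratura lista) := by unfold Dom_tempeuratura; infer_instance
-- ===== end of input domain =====

-- B replaces A's five-way if chain by a boundary table with parallel labels; objective: idiomatic.

-- ===== PORT A =====
def tempeuratura (lista : List Int) : String :=
  match lista with
  | [] => ""  -- unreachable under Pre_ (Python A falls off the loop and returns None here)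
  | i :: rest =>
    if i < 0 then "HELADO"
    else if 0 ≤ i ∧ i < 10 then "FRIO"
    else if 10 ≤ i ∧ i < 20 then "CALIDO"
    else if 20 ≤ i ∧ i < 30 then "SOFOCANTE"
    else if 30 ≤ i then "ABRASIVO"
    else tempeuratura rest

-- ===== PORT B =====
def tempeuratura_alt (lista : List Int) : String :=
  match lista with
  | [] => ""  -- unreachable under Pre_
  | i :: _ =>
    (["HELADO", "FRIO", "CALIDO", "SOFOCANTE", "ABRASIVO"]).getD
      (([0, 10, 20, 30] : List Int).countP (fun b => b ≤ i)) ""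

-- ===== PRECONDITION & SPEC =====
-- Pre_ excludes only the empty list, on which Python A falls off the loop and returns None (not a str).
def Pre_tempeuratura (lista : List Int) : Prop := lista ≠ []
instance (lista : List Int) : Decidable (Pre_tempeuratura lista) := by unfold Pre_tempeuratura; infer_instance
def pvWitness_tempeuratura : List Int := [15]
def Spec_tempeuratura (lista : List Int) (out : String) : Prop := out = tempeuratura_alt lista
instance (lista : List Int) (out : String) : Decidable (Spec_tempeuratura lista out) := by unfold Spec_tempeuratura; infer_instance

-- ===== CLAIM (what is proved, stated in full; the proofs are below) =====
def Claim_equal_tempeuratura : Prop := ∀ (lista : List Int), Dom_tempeuratura lista → Pre_tempeuratura lista → Spec_tempeuratura lista (tempeuratura lista)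

-- ===== LEMMAS AND PROOFS =====

-- ===== VERDICT (by name: the statement is the Claim_ definition above) =====
theorem tempeuratura_spec : Claim_equal_tempeuratura := by
  intro lista _ hpre
  cases lista with
  | nil => exact absurd rfl hpre
  | cons i rest =>
    show tempeuratura (i :: rest) = tempeuratura_alt (i :: rest)
    simp only [tempeuratura, tempeuratura_alt]
    split_ifs with h1 h2 h3 h4 h5
    · simp [List.countP, List.countP.go, show ¬((0:Int) ≤ i) by omega, show ¬((10:Int) ≤ i) by omega,
        show ¬((20:Int) ≤ i) by omega, show ¬((30:Int) ≤ i) by omega]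
    · simp [List.countP, List.countP.go, show ((0:Int) ≤ i) by omega, show ¬((10:Int) ≤ i) by omega,
        show ¬((20:Int) ≤ i) by omega, show ¬((30:Int) ≤ i) by omega]
    · simp [List.countP, List.countP.go, show ((0:Int) ≤ i) by omega, show ((10:Int) ≤ i) by omega,
        show ¬((20:Int) ≤ i) by omega, show ¬((30:Int) ≤ i) by omega]
    · simp [List.countP, List.countP.go, show ((0:Int) ≤ i) by omega, show ((10:Int) ≤ i) by omega,
        show ((20:Int) ≤ i) by omega, show ¬((30:Int) ≤ i) by omega]
    · simp [List.countP, List.countP.go, show ((0:Int) ≤ i) by omega, show ((10:Int) ≤ i) by omega,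
        show ((20:Int) ≤ i) by omega, show ((30:Int) ≤ i) by omega]
    · omega
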